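-- pv_equiv track=rewrite | github.com/EunkiSong/symtuner_edit | symtuner/bin.py | _escape_inner_quotes
-- ===== SOURCE A (Python) =====
-- def _escape_inner_quotes(s: str) -> str:
--     """
--     정규표현식 내부의 ', " 그리고 ` 앞에 백슬래시를 붙여 준다.
--     이미 \', \" 혹은 \` 인 경우는 다시 이스케이프하지 않는다.
--     (즉, 바로 앞 문자가 '\'가 아니면 '\'를 붙인다.)
--     """
--     result = []
--     prev_backslash = False
--     for ch in s:
--         if ch in ("'", '"', '`'):
--             if not prev_backslash:
--                 result.append('\\')
--         result.append(ch)
--         prev_backslash = (ch == '\\')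
--     return ''.join(result)
-- ===== SOURCE B (Python) =====
-- def _escape_inner_quotes(s: str) -> str:
--     # Tokenize into units: a backslash together with the one character it
--     # protects (when that character is not itself a backslash), or a single
--     # character; then escape bare quote units and join.
--     units = []
--     i = 0
--     while i < len(s):
--         if s[i] == '\\' and i + 1 < len(s) and s[i + 1] != '\\':
--             units.append(s[i:i + 2])
--             i += 2
--         else:
--             units.append(s[i])
--             i += 1
--     return ''.join('\\' + u if u in ("'", '"', '`') else u for u in units)
-- ===== Notes on version B (the rewrite author's own statement) =====
-- stated objective: alternative
-- what changed: B is a two-stage algorithm: it first tokenizes the string into escape units (a backslash paired with the character it protects, or a single character), then escapes bare quote units and joins, instead of A's single pass carrying a prev_backslash flag.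
import Mathlib
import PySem

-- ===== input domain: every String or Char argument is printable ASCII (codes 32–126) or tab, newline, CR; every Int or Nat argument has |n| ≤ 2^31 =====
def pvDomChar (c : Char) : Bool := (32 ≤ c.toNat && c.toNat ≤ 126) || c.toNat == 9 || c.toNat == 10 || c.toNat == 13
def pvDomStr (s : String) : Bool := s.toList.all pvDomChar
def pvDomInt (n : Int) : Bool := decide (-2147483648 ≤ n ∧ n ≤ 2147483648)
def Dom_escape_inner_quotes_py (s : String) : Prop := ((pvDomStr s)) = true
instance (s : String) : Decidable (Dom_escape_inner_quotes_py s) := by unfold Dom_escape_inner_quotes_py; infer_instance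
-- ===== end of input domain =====

-- B replaces A's one-pass scan with a prev_backslash flag by a two-stage algorithm:
-- tokenize into escape units (backslash + protected char, or single char), then
-- escape bare quote units and join; same cost, an alternative decomposition.

-- ===== PORT A =====
-- Port of A: fold over the characters with (result, prev_backslash) state.
def escape_inner_quotes_py (s : String) : String :=
  let step : (List Char × Bool) → Char → (List Char × Bool) := fun st ch =>
    let res :=
      if ch = '\'' ∨ ch = '"' ∨ ch = '`' then
        (if st.2 = false then st.1 ++ ['\\'] else st.1) ++ [ch]
      else st.1 ++ [ch]
    (res, ch = '\\')
  String.mk (s.toList.foldl step ([], false)).1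

-- ===== PORT B =====
-- Port of B, stage 1: the while-loop tokenizer, as recursion over the character list
-- (i / i+1 / i+2 of the Python index scan become the head patterns of the list).
def pvUnits : List Char → List (List Char)
  | [] => []
  | [c] => [[c]]
  | c :: d :: rest =>
      if c = '\\' ∧ d ≠ '\\' then [c, d] :: pvUnits rest
      else [c] :: pvUnits (d :: rest)

-- Port of B, stage 2: escape bare quote units and join.
def escape_inner_quotes_py_alt (s : String) : String :=
  String.mk ((pvUnits s.toList).flatMap (fun u =>
    if u = ['\''] ∨ u = ['"'] ∨ u = ['`'] then '\\' :: u else u))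

-- ===== PRECONDITION & SPEC =====
def Spec_escape_inner_quotes_py (s : String) (out : String) : Prop := out = escape_inner_quotes_py_alt s
instance (s : String) (out : String) : Decidable (Spec_escape_inner_quotes_py s out) := by unfold Spec_escape_inner_quotes_py; infer_instance

-- ===== CLAIM (what is proved, stated in full; the proofs are below) =====
def Claim_equal_escape_inner_quotes_py : Prop := ∀ (s : String), Dom_escape_inner_quotes_py s → Spec_escape_inner_quotes_py s (escape_inner_quotes_py s)

-- ===== LEMMAS AND PROOFS =====
-- A's loop step, named so the lemma can speak about it.
def pvStepA : (List Char × Bool) → Char → (List Char × Bool) := fun st ch =>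
  let res :=
    if ch = '\'' ∨ ch = '"' ∨ ch = '`' then
      (if st.2 = false then st.1 ++ ['\\'] else st.1) ++ [ch]
    else st.1 ++ [ch]
  (res, ch = '\\')

-- A's fold from a prev_backslash = false state produces exactly B's flattened units.
theorem pv_fold_units : ∀ (cs : List Char) (acc : List Char),
    (cs.foldl pvStepA (acc, false)).1
      = acc ++ (pvUnits cs).flatMap (fun u =>
          if u = ['\''] ∨ u = ['"'] ∨ u = ['`'] then '\\' :: u else u) := by
  intro cs
  induction cs using pvUnits.induct with
  | case1 => intro acc; simp [pvUnits]
  | case2 c =>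
    intro acc
    by_cases hq : c = '\'' ∨ c = '"' ∨ c = '`' <;>
      simp [pvUnits, pvStepA, hq]
  | case3 c d rest h ih =>
    intro acc
    obtain ⟨hc, hd⟩ := h
    subst hc
    have hq : ¬ ('\\' = '\'' ∨ '\\' = '"' ∨ '\\' = '`') := by decide
    by_cases hdq : d = '\'' ∨ d = '"' ∨ d = '`' <;>
      · simp only [List.foldl_cons, pvStepA, hq, if_neg hq, hdq, if_pos, if_neg,
          ite_true, ite_false, decide_eq_true_eq] at *
        simp [pvUnits, hd, ih, List.append_assoc]
  | case4 c d rest h ih =>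
    intro acc
    by_cases hc : c = '\\'
    · -- here d = '\\' (otherwise case3 would apply); the flag set by c is irrelevant,
      -- since the next character d = '\\' is not a quote.
      subst hc
      have hd : d = '\\' := by
        by_contra hd; exact h ⟨rfl, hd⟩
      subst hd
      have hib := ih (acc ++ ['\\'])
      have hstep : pvStepA (acc ++ ['\\'], false) '\\' = (acc ++ ['\\', '\\'], true) := by
        simp [pvStepA]
      rw [List.foldl_cons, hstep] at hib
      have hstep0 : pvStepA (acc, false) '\\' = (acc ++ ['\\'], true) := by simp [pvStepA]
      have hstep1 : pvStepA (acc ++ ['\\'], true) '\\' = (acc ++ ['\\', '\\'], true) := by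
        simp [pvStepA]
      rw [List.foldl_cons, hstep0, List.foldl_cons, hstep1, hib]
      simp [pvUnits]
    · have hstep : pvStepA (acc, false) c =
          (acc ++ (if c = '\'' ∨ c = '"' ∨ c = '`' then ['\\', c] else [c]), false) := by
        by_cases hq : c = '\'' ∨ c = '"' ∨ c = '`' <;> simp [pvStepA, hq, hc]
      rw [List.foldl_cons, hstep, ih]
      by_cases hq : c = '\'' ∨ c = '"' ∨ c = '`'
      · rcases hq with h' | h' | h' <;> subst h' <;>
          simp [pvUnits, List.append_assoc]
      · simp [pvUnits, h, hq, List.append_assoc]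

-- ===== VERDICT (by name: the statement is the Claim_ definition above) =====
theorem escape_inner_quotes_py_spec : Claim_equal_escape_inner_quotes_py := by
  intro s _
  show _ = _
  unfold escape_inner_quotes_py escape_inner_quotes_py_alt
  simpa using congrArg String.mk (pv_fold_units s.toList [])
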